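-- pv_equiv track=rewrite | github.com/daniel-reich/turbo-robot | oaN8o42vuzsdnCf4x_10.py | best_words
-- ===== SOURCE A (Python) =====
-- def best_words(lst):
--   scores = {'A':  1, 'B': 3, 'C': 3, 'D': 2, 'E': 1, 'F': 4, 'G': 2, 'H': 4, 'I': 1, 'J': 8, 'K': 5, 'L': 2, 'M': 3, 'N': 1, 'O': 1, 'P': 3, 'Q': 10, 'R':  1, 'S': 1, 'T': 1, 'U': 1, 'V': 4, 'W': 4, 'X': 8, 'Y': 4, 'Z': 10}
--   points = []
--   word_points = {}
--   for word in lst: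
--     l8rs = list(word)
--     p = 0
--     for l8r in l8rs:
--       point = scores[l8r.upper()]
--       p += point
--     points.append(p)
--     word_points[word] = p
--
--   high_points = max(points)
--   winners = []
--   for word in lst:
--     value = word_points[word]
--     if value == high_points:
--       winners.append(word)
--   return winners
-- ===== SOURCE B (Python) =====
-- def best_words(lst):
--   scores = {'A':  1, 'B': 3, 'C': 3, 'D': 2, 'E': 1, 'F': 4, 'G': 2, 'H': 4, 'I': 1, 'J': 8, 'K': 5, 'L': 2, 'M': 3, 'N': 1, 'O': 1, 'P': 3, 'Q': 10, 'R':  1, 'S': 1, 'T': 1, 'U': 1, 'V': 4, 'W': 4, 'X': 8, 'Y': 4, 'Z': 10}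
--   best = None
--   winners = []
--   for word in lst:
--     p = sum(scores[c.upper()] for c in word)
--     if best is None or p > best:
--       best = p
--       winners = [word]
--     elif p == best:
--       winners.append(word)
--   return winners
-- ===== Notes on version B (the rewrite author's own statement) =====
-- stated objective: simpler
-- what changed: One streaming pass maintaining the running best score and the current winners list (reset on a new maximum), instead of A's two passes through lst with an intermediate points list, a word->points dict and a separate max() step.
-- outside the precondition, e.g. on best_words([]): A raises ValueError, B returns []
import Mathlib
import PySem

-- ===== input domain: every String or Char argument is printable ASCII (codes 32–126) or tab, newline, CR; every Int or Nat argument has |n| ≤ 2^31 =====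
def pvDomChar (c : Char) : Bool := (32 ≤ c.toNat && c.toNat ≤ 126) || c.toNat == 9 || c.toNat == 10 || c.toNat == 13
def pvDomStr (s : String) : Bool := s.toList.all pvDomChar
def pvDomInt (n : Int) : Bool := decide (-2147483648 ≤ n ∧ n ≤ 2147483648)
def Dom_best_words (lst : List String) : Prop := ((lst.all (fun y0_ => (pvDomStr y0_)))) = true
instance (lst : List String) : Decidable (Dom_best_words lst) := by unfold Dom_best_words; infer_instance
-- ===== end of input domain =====

-- B replaces A's two passes + points list + word->points dict by one streaming pass keeping
-- the running best score and the current winners (objective: simpler).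

-- the scrabble scores dict, shared verbatim by both Pythons (keys are 1-char strings, ported as Char)
def pvScores : PySem.Dict Char Int := PySem.Dict.ofList
  [('A', 1), ('B', 3), ('C', 3), ('D', 2), ('E', 1), ('F', 4), ('G', 2), ('H', 4), ('I', 1),
   ('J', 8), ('K', 5), ('L', 2), ('M', 3), ('N', 1), ('O', 1), ('P', 3), ('Q', 10), ('R', 1),
   ('S', 1), ('T', 1), ('U', 1), ('V', 4), ('W', 4), ('X', 8), ('Y', 4), ('Z', 10)]

-- the inner per-word loop 'p = 0; for l8r in word: p += scores[l8r.upper()]', identical in A and B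
-- (under Pre_ every character is a letter, so the KeyError case — getD default — is unreachable)
def pvWordScore (w : String) : Int :=
  w.toList.foldl (fun p c => p + pvScores.getD (PySem.Chars.upperChar c) 0) 0

-- ===== PORT A =====
def best_words (lst : List String) : List String :=
  let st := lst.foldl
    (fun (acc : List Int × PySem.Dict String Int) word =>
      let p := pvWordScore word
      (acc.1 ++ [p], acc.2.insert word p))
    ([], PySem.Dict.empty)
  match PySem.List.max? st.1 (fun x => x) with
  | none => []   -- max([]) raises ValueError: excluded by Pre_
  | some high_points =>
      lst.foldl (fun winners word =>
        if st.2.getD word 0 = high_points then winners ++ [word] else winners) []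

-- ===== PORT B =====
def best_words_alt (lst : List String) : List String :=
  (lst.foldl
    (fun (acc : Option Int × List String) word =>
      let p := pvWordScore word
      match acc.1 with
      | none => (some p, [word])
      | some best =>
          if best < p then (some p, [word])
          else if p = best then (some best, acc.2 ++ [word])
          else acc)
    (none, [])).2

-- ===== PRECONDITION & SPEC =====
-- Pre_ excludes exactly the inputs where the Python A raises: the empty list (ValueError from
-- max([])) and words with a non-letter character (KeyError in the scores lookup).
def Pre_best_words (lst : List String) : Prop :=
  lst ≠ [] ∧ (lst.all (fun w => w.toList.all PySem.Chars.isalpha)) = true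
instance (lst : List String) : Decidable (Pre_best_words lst) := by unfold Pre_best_words; infer_instance
def pvWitness_best_words : List String := ["ab", "Qz", "cat"]

def Spec_best_words (lst : List String) (out : List String) : Prop := out = best_words_alt lst
instance (lst : List String) (out : List String) : Decidable (Spec_best_words lst out) := by unfold Spec_best_words; infer_instance

-- ===== CLAIM (what is proved, stated in full; the proofs are below) =====
def Claim_equal_best_words : Prop := ∀ (lst : List String), Dom_best_words lst → Pre_best_words lst → Spec_best_words lst (best_words lst)


-- ===== LEMMAS AND PROOFS =====

-- A's first loop, dict component: lookup of a member returns its score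
theorem pv_dict_getD_not_mem (t : List String) (d : PySem.Dict String Int) (w : String)
    (h : w ∉ t) :
    (t.foldl (fun d x => d.insert x (pvWordScore x)) d).getD w 0 = d.getD w 0 := by
  induction t generalizing d with
  | nil => rfl
  | cons x t ih =>
      simp only [List.mem_cons, not_or] at h
      simp only [List.foldl_cons, ih _ h.2, PySem.Dict.getD_insert, if_neg h.1]

theorem pv_dict_getD_mem (t : List String) (d : PySem.Dict String Int) (w : String)
    (h : w ∈ t) :
    (t.foldl (fun d x => d.insert x (pvWordScore x)) d).getD w 0 = pvWordScore w := by
  induction t generalizing d with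
  | nil => cases h
  | cons x t ih =>
      by_cases hw : w ∈ t
      · simpa using ih _ hw
      · have hx : w = x := by
          rcases List.mem_cons.mp h with h' | h'
          exacts [h', absurd h' hw]
        subst hx
        simp [pv_dict_getD_not_mem t _ w hw]

-- A's first loop computes (points list, dict)
theorem pv_foldA (lst : List String) (pts : List Int) (d : PySem.Dict String Int) :
    lst.foldl
      (fun (acc : List Int × PySem.Dict String Int) word =>
        (acc.1 ++ [pvWordScore word], acc.2.insert word (pvWordScore word)))
      (pts, d)
    = (pts ++ lst.map pvWordScore, lst.foldl (fun d x => d.insert x (pvWordScore x)) d) := by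
  induction lst generalizing pts d with
  | nil => simp
  | cons x t ih => simp [ih]

-- generic: foldl only depends on the step function on members
theorem pv_foldl_congr {a b : Type} (l : List b) (f g : List a -> b -> List a) (init : List a)
    (h : forall acc x, x ∈ l -> f acc x = g acc x) : l.foldl f init = l.foldl g init := by
  induction l generalizing init with
  | nil => rfl
  | cons x t ih =>
      simp only [List.foldl_cons, h init x (List.mem_cons_self)]
      exact ih _ (fun acc y hy => h acc y (List.mem_cons_of_mem _ hy))

-- B's loop invariant: running best + winners from a (some b, ws) state
theorem pv_foldB (t : List String) (b : Int) (ws : List String) :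
    t.foldl
      (fun (acc : Option Int × List String) word =>
        match acc.1 with
        | none => (some (pvWordScore word), [word])
        | some best =>
            if best < pvWordScore word then (some (pvWordScore word), [word])
            else if pvWordScore word = best then (some best, acc.2 ++ [word])
            else acc)
      (some b, ws)
    = (some ((t.map pvWordScore).foldl max b),
       (if b = (t.map pvWordScore).foldl max b then ws else []) ++
         t.filter (fun w => decide (pvWordScore w = (t.map pvWordScore).foldl max b))) := by
  induction t generalizing b ws with
  | nil => simp
  | cons x t ih =>
      have hle : max b (pvWordScore x) ≤ (t.map pvWordScore).foldl max (max b (pvWordScore x)) :=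
        (PySem.List.le_foldl_max _ _).1
      simp only [List.foldl_cons, List.map_cons]
      by_cases h1 : b < pvWordScore x
      · have hmax : max b (pvWordScore x) = pvWordScore x := max_eq_right h1.le
        rw [if_pos h1, ih]
        simp only [hmax] at hle ⊢
        have hb : ¬ b = (t.map pvWordScore).foldl max (pvWordScore x) := by omega
        simp only [List.filter_cons, decide_eq_true_eq, if_neg hb]
        by_cases h2 : pvWordScore x = (t.map pvWordScore).foldl max (pvWordScore x)
        · simp only [if_pos h2]
          simp
        · simp only [if_neg h2]
      · rw [if_neg h1]
        have hmax : max b (pvWordScore x) = b := max_eq_left (by omega)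
        simp only [hmax] at hle
        by_cases h2 : pvWordScore x = b
        · rw [if_pos h2, ih]
          simp only [hmax, List.filter_cons, decide_eq_true_eq]
          by_cases h3 : b = (t.map pvWordScore).foldl max b
          · simp only [if_pos h3, if_pos (h2.trans h3)]
            simp
          · have hx : ¬ pvWordScore x = (t.map pvWordScore).foldl max b := by omega
            simp only [if_neg h3, if_neg hx]
        · rw [if_neg h2, ih]
          simp only [hmax, List.filter_cons, decide_eq_true_eq]
          have hx : ¬ pvWordScore x = (t.map pvWordScore).foldl max b := by omega
          rw [if_neg hx]

-- both ports equal filter-by-max on a nonempty list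
theorem pv_main (x : String) (t : List String) :
    best_words (x :: t) = best_words_alt (x :: t) := by
  unfold best_words best_words_alt
  simp only [pv_foldA, List.nil_append, List.map_cons]
  rw [PySem.List.max?_id_cons]
  dsimp only
  set M : Int := ((t.map pvWordScore).foldl max (pvWordScore x)) with hM
  -- A side: replace dict lookups by pvWordScore, then turn the loop into a filter
  rw [pv_foldl_congr (x :: t)
        (fun winners word =>
          if ((x :: t).foldl (fun d y => d.insert y (pvWordScore y)) PySem.Dict.empty).getD word 0 = M
          then winners ++ [word] else winners)
        (fun winners word => if pvWordScore word = M then winners ++ [word] else winners)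
        []
        (by
          intro acc w hw
          dsimp only
          rw [pv_dict_getD_mem _ _ _ hw])]
  rw [PySem.List.foldl_append_ite_eq_filter]
  -- B side
  simp only [List.foldl_cons, pv_foldB, List.nil_append]
  rw [← hM, List.filter_cons]
  simp only [decide_eq_true_eq]
  by_cases h : pvWordScore x = M
  · simp only [if_pos h]
    simp
  · simp only [if_neg h]
    simp

-- ===== VERDICT (by name: the statement is the Claim_ definition above) =====
theorem best_words_spec : Claim_equal_best_words := by
  intro lst _ hpre
  unfold Spec_best_words
  cases lst with
  | nil => exact absurd rfl hpre.1
  | cons x t => exact pv_main x t
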